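-- pv_equiv track=rewrite | github.com/alex-calderwood/msu-data-mining-project | plsa/TreeTagger/TheNewYorkTimes/plsa_sparse.py | transpose_doc
-- ===== SOURCE A (Python) =====
-- def transpose_doc(docs, nb_words) :
-- 	docs_mat = list()
-- 	for i in range(0,nb_words):
-- 		ligne = list()
-- 		for j in range(0,len(docs)):
-- 			if str(i+1) in docs[j]:
-- 				ligne.append((docs[j])[str(i+1)])
-- 			else :
-- 				ligne.append(0)
-- 		docs_mat.append(ligne)
-- 	return docs_mat
-- ===== SOURCE B (Python) =====
-- def transpose_doc(docs, nb_words):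
--     docs_mat = [[0] * len(docs) for _ in range(nb_words)]
--     index = {str(i + 1): i for i in range(nb_words)}
--     for j, doc in enumerate(docs):
--         for key, value in doc.items():
--             row = index.get(key)
--             if row is not None:
--                 docs_mat[row][j] = value
--     return docs_mat
-- ===== Notes on version B (the rewrite author's own statement) =====
-- stated objective: faster
-- what changed: A builds the matrix row by row, probing every document once per word row and recomputing str(i+1) for every cell; B pre-allocates a zero matrix, builds the str(i+1)->i index dict once, and fills it in a single scatter pass over the entries actually present, cutting the per-cell work to plain list writes; Pre_ only excludes association lists with duplicate keys inside one document, which no Python dict can represent.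
import Mathlib
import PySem

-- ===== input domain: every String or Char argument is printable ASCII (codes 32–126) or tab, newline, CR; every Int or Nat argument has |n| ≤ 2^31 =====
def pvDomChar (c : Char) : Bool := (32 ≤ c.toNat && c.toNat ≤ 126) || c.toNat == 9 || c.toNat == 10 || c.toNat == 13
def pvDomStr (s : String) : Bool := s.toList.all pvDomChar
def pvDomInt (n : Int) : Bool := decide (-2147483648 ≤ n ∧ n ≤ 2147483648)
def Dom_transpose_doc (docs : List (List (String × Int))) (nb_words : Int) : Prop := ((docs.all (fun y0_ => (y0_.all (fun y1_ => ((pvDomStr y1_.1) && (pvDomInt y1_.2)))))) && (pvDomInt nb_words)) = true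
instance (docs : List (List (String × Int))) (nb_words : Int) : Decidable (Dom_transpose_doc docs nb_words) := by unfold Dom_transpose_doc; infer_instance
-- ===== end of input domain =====

-- B replaces A's per-cell dict probing (recomputing str(i+1) for every cell) by a zero matrix
-- plus an index dict built once and a single scatter pass over the entries actually present
-- (alternative decomposition; the return value is the same, neither version mutates its input).

-- ===== PORT A =====
def transpose_doc (docs : List (List (String × Int))) (nb_words : Int) : List (List Int) :=
  (PySem.List.pyRange 0 nb_words 1).foldl (fun docs_mat i =>
    docs_mat ++ [((PySem.List.pyRange 0 (PySem.List.len docs) 1).foldl (fun ligne j =>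
      if PySem.Dict.contains (PySem.Dict.mk (PySem.List.pyGetD docs j [])) (PySem.Int.toStr (i + 1)) then
        ligne ++ [PySem.Dict.getD (PySem.Dict.mk (PySem.List.pyGetD docs j [])) (PySem.Int.toStr (i + 1)) 0]
      else
        ligne ++ [0]) [])]) []

-- ===== PORT B =====
def transpose_doc_alt (docs : List (List (String × Int))) (nb_words : Int) : List (List Int) :=
  let docs_mat := (PySem.List.pyRange 0 nb_words 1).map (fun _ => List.replicate docs.length (0 : Int))
  let index : PySem.Dict String Int :=
    (PySem.List.pyRange 0 nb_words 1).foldl (fun d i => PySem.Dict.insert d (PySem.Int.toStr (i + 1)) i) (PySem.Dict.mk [])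
  (PySem.List.enumerate docs).foldl (fun mat p =>
    p.2.foldl (fun mat kv =>
      match PySem.Dict.get? index kv.1 with
      | some row => PySem.List.pySetD mat row (PySem.List.pySetD (PySem.List.pyGetD mat row []) p.1 kv.2)
      | none => mat) mat) docs_mat

-- ===== PRECONDITION & SPEC =====
-- Pre_ excludes association lists in which some document has duplicate keys: such lists cannot
-- arise from a Python dict (both A and B receive real dicts in Python), and on them A's
-- first-match lookup and B's last-write scatter are both accidental readings of a
-- representation that has no Python meaning.
def Pre_transpose_doc (docs : List (List (String × Int))) (nb_words : Int) : Prop :=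
  ∀ doc ∈ docs, (doc.map Prod.fst).Nodup
instance (docs : List (List (String × Int))) (nb_words : Int) : Decidable (Pre_transpose_doc docs nb_words) := by unfold Pre_transpose_doc; infer_instance
def pvWitness_transpose_doc : (List (List (String × Int))) × Int :=
  ([[("1", 5), ("x", 7)], [], [("2", 3), ("01", 9)]], 2)

def Spec_transpose_doc (docs : List (List (String × Int))) (nb_words : Int) (out : List (List Int)) : Prop := out = transpose_doc_alt docs nb_words
instance (docs : List (List (String × Int))) (nb_words : Int) (out : List (List Int)) : Decidable (Spec_transpose_doc docs nb_words out) := by unfold Spec_transpose_doc; infer_instance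

-- ===== CLAIM (what is proved, stated in full; the proofs are below) =====
def Claim_equal_transpose_doc : Prop := ∀ (docs : List (List (String × Int))) (nb_words : Int), Dom_transpose_doc docs nb_words → Pre_transpose_doc docs nb_words → Spec_transpose_doc docs nb_words (transpose_doc docs nb_words)

-- ===== LEMMAS AND PROOFS =====

-- decimal evaluation of str(n): a left inverse of Nat.toDigits 10, hence injectivity of str on 0 ≤ n
def pvVal (cs : List Char) : Nat := cs.foldl (fun a c => 10 * a + (c.toNat - 48)) 0

theorem pvVal_append (xs : List Char) (c : Char) :
    pvVal (xs ++ [c]) = 10 * pvVal xs + (c.toNat - 48) := by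
  simp [pvVal, List.foldl_append]

theorem pvDigitChar_toNat (d : Nat) (hd : d < 10) : (Nat.digitChar d).toNat - 48 = d := by
  interval_cases d <;> rfl

theorem pvVal_toDigits (n : Nat) : pvVal (Nat.toDigits 10 n) = n := by
  induction n using Nat.strong_induction_on with
  | _ n ih =>
    rw [Nat.toDigits_eq_if (by norm_num)]
    split
    · next h =>
      have hv : pvVal [Nat.digitChar n] = (Nat.digitChar n).toNat - 48 := by simp [pvVal]
      rw [hv, pvDigitChar_toNat n h]
    · next h =>
      rw [pvVal_append, ih (n / 10) (by omega), pvDigitChar_toNat (n % 10) (by omega)]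
      omega

theorem pvToStr_inj {a b : Int} (ha : 0 ≤ a) (hb : 0 ≤ b)
    (h : PySem.Int.toStr a = PySem.Int.toStr b) : a = b := by
  have h2 : PySem.Int.toChars a = PySem.Int.toChars b := by
    have := congrArg String.toList h
    simpa [PySem.Int.toList_toStr] using this
  unfold PySem.Int.toChars at h2
  rw [if_neg (by omega), if_neg (by omega)] at h2
  have h3 := congrArg pvVal h2
  rw [pvVal_toDigits, pvVal_toDigits] at h3
  omega

-- the index dict {str(i+1): i for i in range(nb_words)}
def pvIndex (nb : Int) : PySem.Dict String Int :=
  (PySem.List.pyRange 0 nb 1).foldl (fun d i => PySem.Dict.insert d (PySem.Int.toStr (i + 1)) i) (PySem.Dict.mk [])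

theorem pvIndex_items (nb : Int) :
    (pvIndex nb).items = (PySem.List.pyRange 0 nb 1).map (fun i => (PySem.Int.toStr (i + 1), i)) := by
  unfold pvIndex
  rw [PySem.Dict.items_foldl_insert_fresh _ _ _ _ (by intro a _; simp [PySem.Dict.contains_mk])
    (List.Nodup.map_on (by
      intro x hx y hy hxy
      have hx' := PySem.List.mem_pyRange_one.mp hx
      have hy' := PySem.List.mem_pyRange_one.mp hy
      have := pvToStr_inj (by omega) (by omega) hxy
      omega) (PySem.List.nodup_pyRange_one 0 nb))]
  rfl

theorem pvIndex_keys_nodup (nb : Int) : (pvIndex nb).keys.Nodup := by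
  have h : (pvIndex nb).keys = (PySem.List.pyRange 0 nb 1).map (fun i => PySem.Int.toStr (i + 1)) := by
    simp only [PySem.Dict.keys, pvIndex_items, List.map_map]; rfl
  rw [h]
  exact List.Nodup.map_on (by
      intro x hx y hy hxy
      have hx' := PySem.List.mem_pyRange_one.mp hx
      have hy' := PySem.List.mem_pyRange_one.mp hy
      have := pvToStr_inj (by omega) (by omega) hxy
      omega) (PySem.List.nodup_pyRange_one 0 nb)

theorem pvIndex_get? (nb : Int) (k : String) (r : Int) :
    PySem.Dict.get? (pvIndex nb) k = some r ↔ 0 ≤ r ∧ r < nb ∧ k = PySem.Int.toStr (r + 1) := by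
  rw [PySem.Dict.get?_eq_some_iff_mem_items _ _ _ (pvIndex_keys_nodup nb), pvIndex_items]
  simp only [List.mem_map, Prod.mk.injEq, PySem.List.mem_pyRange_one]
  constructor
  · rintro ⟨i, ⟨h0, h1⟩, hk, hi⟩; subst hi; exact ⟨h0, h1, hk.symm⟩
  · rintro ⟨h0, h1, hk⟩; exact ⟨r, ⟨h0, h1⟩, hk.symm, rfl⟩

-- last-match fold over a document for a fixed row r (what B's overwriting scatter keeps)
def pvLM (nb : Int) (doc : List (String × Int)) (r : Int) : Option Int :=
  doc.foldl (fun acc kv => if PySem.Dict.get? (pvIndex nb) kv.1 = some r then some kv.2 else acc) none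

theorem pvLM_acc (nb : Int) (doc : List (String × Int)) (r : Int) (acc : Option Int) :
    doc.foldl (fun acc kv => if PySem.Dict.get? (pvIndex nb) kv.1 = some r then some kv.2 else acc) acc
      = (pvLM nb doc r).or acc := by
  induction doc generalizing acc with
  | nil => simp [pvLM]
  | cons kv rest ih =>
    simp only [pvLM, List.foldl_cons] at *
    rw [ih, ih (if PySem.Dict.get? (pvIndex nb) kv.1 = some r then some kv.2 else none)]
    cases h : rest.foldl (fun acc kv => if PySem.Dict.get? (pvIndex nb) kv.1 = some r then some kv.2 else acc) none
    · simp [Option.or]; split <;> simp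
    · simp [Option.or]

theorem pvLM_eq_get? (nb : Int) (doc : List (String × Int)) (r : Int)
    (hr0 : 0 ≤ r) (hr1 : r < nb) (hnd : (doc.map Prod.fst).Nodup) :
    pvLM nb doc r = PySem.Dict.get? (PySem.Dict.mk doc) (PySem.Int.toStr (r + 1)) := by
  induction doc with
  | nil => rfl
  | cons kv rest ih =>
    simp only [List.map_cons, List.nodup_cons] at hnd
    have hrest := ih hnd.2
    simp only [pvLM, List.foldl_cons]
    rw [pvLM_acc, PySem.Dict.get?_mk_cons]
    by_cases hk : kv.1 = PySem.Int.toStr (r + 1)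
    · have hcond : PySem.Dict.get? (pvIndex nb) kv.1 = some r := (pvIndex_get? nb kv.1 r).mpr ⟨hr0, hr1, hk⟩
      have hnone : PySem.Dict.get? (PySem.Dict.mk rest) (PySem.Int.toStr (r + 1)) = none := by
        rw [PySem.Dict.get?_eq_none_iff_not_mem_keys, PySem.Dict.keys_mk]
        rw [hk] at hnd
        exact hnd.1
      rw [hcond, hrest, hnone]
      simp [hk, Option.or]
    · have hcond : ¬ PySem.Dict.get? (pvIndex nb) kv.1 = some r := by
        intro h; exact hk ((pvIndex_get? nb kv.1 r).mp h).2.2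
      rw [if_neg hcond, if_neg (by simpa using hk), hrest]
      cases PySem.Dict.get? (PySem.Dict.mk rest) (PySem.Int.toStr (r + 1)) <;> simp [Option.or]

-- matrix cells, totalised
def pvCell (mat : List (List Int)) (r j : Nat) : Int := (mat.getD r []).getD j 0

theorem pvCell_set (mat : List (List Int)) (a : Nat) (v : List Int) (r j : Nat) :
    pvCell (mat.set a v) r j = if r = a ∧ a < mat.length then v.getD j 0 else pvCell mat r j := by
  unfold pvCell
  show ((mat.set a v).getD r []).getD j 0 = _
  rw [show (mat.set a v).getD r [] = ((mat.set a v)[r]?).getD [] from List.getD_eq_getElem?_getD ..,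
      show mat.getD r [] = (mat[r]?).getD [] from List.getD_eq_getElem?_getD .., List.getElem?_set]
  by_cases h1 : r = a
  · subst h1
    by_cases h2 : r < mat.length
    · simp [h2]
    · simp [h2]
  · simp [h1, Ne.symm h1]

theorem pvCell_eq_getElem (mat : List (List Int)) (r j : Nat) (hr : r < mat.length)
    (hj : j < mat[r].length) : pvCell mat r j = mat[r][j] := by
  unfold pvCell
  rw [show mat.getD r [] = (mat[r]?).getD [] from List.getD_eq_getElem?_getD ..,
      List.getElem?_eq_getElem hr]
  simp [List.getD_eq_getElem?_getD, List.getElem?_eq_getElem hj]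

-- B's inner loop over one document, writing column j
def pvApply (nb j : Int) (doc : List (String × Int)) (mat : List (List Int)) : List (List Int) :=
  doc.foldl (fun mat kv =>
    match PySem.Dict.get? (pvIndex nb) kv.1 with
    | some row => PySem.List.pySetD mat row (PySem.List.pySetD (PySem.List.pyGetD mat row []) j kv.2)
    | none => mat) mat

theorem pvApply_spec (nb : Int) (L : Nat) (j : Nat) (hj : j < L) (doc : List (String × Int)) :
    ∀ (mat : List (List Int)), mat.length = nb.toNat → (∀ row ∈ mat, row.length = L) →
      (pvApply nb (j : Int) doc mat).length = nb.toNat ∧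
      (∀ row ∈ pvApply nb (j : Int) doc mat, row.length = L) ∧
      ∀ (r jj : Nat), pvCell (pvApply nb (j : Int) doc mat) r jj =
        if jj = j then (pvLM nb doc (r : Int)).getD (pvCell mat r jj) else pvCell mat r jj := by
  induction doc with
  | nil =>
    intro mat hlen hrow
    refine ⟨hlen, hrow, ?_⟩
    intro r jj
    simp only [pvApply, List.foldl_nil, pvLM]
    split <;> rfl
  | cons kv rest ih =>
    intro mat hlen hrow
    rw [show pvApply nb (j : Int) (kv :: rest) mat = pvApply nb (j : Int) rest
        (match PySem.Dict.get? (pvIndex nb) kv.1 with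
         | some row => PySem.List.pySetD mat row (PySem.List.pySetD (PySem.List.pyGetD mat row []) (j : Int) kv.2)
         | none => mat) from rfl]
    cases hmatch : PySem.Dict.get? (pvIndex nb) kv.1 with
    | none =>
      obtain ⟨h1, h2, h3⟩ := ih mat hlen hrow
      refine ⟨h1, h2, ?_⟩
      intro r jj
      rw [h3 r jj]
      have hlm : pvLM nb (kv :: rest) (r : Int) = pvLM nb rest (r : Int) := by
        simp only [pvLM, List.foldl_cons, hmatch]
        simp
      rw [hlm]
    | some i =>
      have hi := (pvIndex_get? nb kv.1 i).mp hmatch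
      have hi0 : 0 ≤ i := hi.1
      have hitoNat : i.toNat < mat.length := by omega
      have hrowlen : mat[i.toNat].length = L := hrow _ (mat.getElem_mem hitoNat)
      have hstep : PySem.List.pySetD mat i (PySem.List.pySetD (PySem.List.pyGetD mat i []) (j : Int) kv.2)
          = mat.set i.toNat (mat[i.toNat].set j kv.2) := by
        rw [PySem.List.pySetD_of_nonneg _ _ hi0,
            PySem.List.pyGetD_eq_getElem _ _ hi0 (by omega),
            PySem.List.pySetD_natCast]
      simp only [hstep]
      set mat' := mat.set i.toNat (mat[i.toNat].set j kv.2) with hmat'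
      have hlen' : mat'.length = nb.toNat := by simp [hmat', hlen]
      have hrow' : ∀ row ∈ mat', row.length = L := by
        intro row hr
        rcases List.mem_or_eq_of_mem_set hr with h | h
        · exact hrow _ h
        · subst h; simp [hrowlen]
      obtain ⟨h1, h2, h3⟩ := ih mat' hlen' hrow'
      refine ⟨h1, h2, ?_⟩
      intro r jj
      rw [h3 r jj]
      have hcell' : ∀ (r jj : Nat), pvCell mat' r jj =
          if r = i.toNat ∧ jj = j then kv.2 else pvCell mat r jj := by
        intro r jj
        rw [hmat', pvCell_set]
        by_cases h : r = i.toNat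
        · subst h
          rw [if_pos ⟨rfl, hitoNat⟩]
          by_cases hjj : jj = j
          · subst hjj
            rw [if_pos ⟨rfl, rfl⟩, List.getD_eq_getElem?_getD, List.getElem?_set_self (by omega)]
            rfl
          · rw [if_neg (by simp [hjj]), List.getD_eq_getElem?_getD,
                List.getElem?_set_ne (fun hh => hjj hh.symm)]
            simp [pvCell, List.getD_eq_getElem?_getD, List.getElem?_eq_getElem hitoNat]
        · rw [if_neg (fun hh => h hh.1), if_neg (fun hh => h hh.1)]
      have hlm : pvLM nb (kv :: rest) (r : Int) =
          (pvLM nb rest (r : Int)).or (if i = (r : Int) then some kv.2 else none) := by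
        simp only [pvLM, List.foldl_cons, hmatch]
        rw [pvLM_acc]
        congr 1
        by_cases h : i = (r : Int) <;> simp [h]
      rw [hlm]
      by_cases hjj : jj = j
      · subst hjj
        rw [if_pos rfl, if_pos rfl, hcell' r jj]
        by_cases hr : r = i.toNat
        · have hir : i = (r : Int) := by omega
          rw [if_pos ⟨hr, rfl⟩, if_pos hir]
          cases pvLM nb rest (r : Int) <;> simp [Option.or]
        · have hir : ¬ i = (r : Int) := by omega
          rw [if_neg (fun hh => hr hh.1), if_neg hir]
          cases pvLM nb rest (r : Int) <;> simp [Option.or]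
      · rw [if_neg hjj, if_neg hjj, hcell' r jj]
        simp [hjj]

theorem pvScatter_spec (nb : Int) (L : Nat) (ds : List (List (String × Int))) :
    ∀ (j0 : Nat) (mat : List (List Int)), mat.length = nb.toNat →
      (∀ row ∈ mat, row.length = L) → j0 + ds.length ≤ L →
      ((PySem.List.enumerate ds (j0 : Int)).foldl (fun mat p => pvApply nb p.1 p.2 mat) mat).length = nb.toNat ∧
      (∀ row ∈ (PySem.List.enumerate ds (j0 : Int)).foldl (fun mat p => pvApply nb p.1 p.2 mat) mat, row.length = L) ∧
      ∀ (r jj : Nat), pvCell ((PySem.List.enumerate ds (j0 : Int)).foldl (fun mat p => pvApply nb p.1 p.2 mat) mat) r jj =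
        if j0 ≤ jj ∧ jj < j0 + ds.length then (pvLM nb (ds.getD (jj - j0) []) (r : Int)).getD (pvCell mat r jj)
        else pvCell mat r jj := by
  induction ds with
  | nil =>
    intro j0 mat hlen hrow hb
    refine ⟨by simp [PySem.List.enumerate, hlen], by simpa [PySem.List.enumerate] using hrow, ?_⟩
    intro r jj
    simp [PySem.List.enumerate]
  | cons d rest ih =>
    intro j0 mat hlen hrow hb
    rw [PySem.List.enumerate_cons]
    simp only [List.foldl_cons]
    have hj0L : j0 < L := by simp at hb; omega
    obtain ⟨a1, a2, a3⟩ := pvApply_spec nb L j0 hj0L d mat hlen hrow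
    have hcast : ((j0 : Int) + 1) = ((j0 + 1 : Nat) : Int) := by push_cast; ring
    rw [hcast]
    obtain ⟨b1, b2, b3⟩ := ih (j0 + 1) (pvApply nb (j0 : Int) d mat) a1 a2 (by simp at hb ⊢; omega)
    refine ⟨b1, b2, ?_⟩
    intro r jj
    rw [b3 r jj]
    by_cases h1 : j0 + 1 ≤ jj ∧ jj < j0 + 1 + rest.length
    · rw [if_pos h1, if_pos (by simp only [List.length_cons]; omega)]
      rw [a3 r jj, if_neg (by omega)]
      have hgd : (d :: rest).getD (jj - j0) [] = rest.getD (jj - (j0 + 1)) [] := by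
        have h2 : jj - j0 = (jj - (j0 + 1)) + 1 := by omega
        rw [h2]; rfl
      rw [hgd]
    · rw [if_neg h1]
      rw [a3 r jj]
      by_cases h2 : jj = j0
      · subst h2
        rw [if_pos rfl, if_pos (by simp only [List.length_cons]; omega)]
        simp
      · rw [if_neg h2, if_neg (by simp only [List.length_cons]; omega)]

theorem pvA_eq (docs : List (List (String × Int))) (nb : Int) :
    transpose_doc docs nb = (PySem.List.pyRange 0 nb 1).map (fun i =>
      docs.map (fun doc => (PySem.Dict.get? (PySem.Dict.mk doc) (PySem.Int.toStr (i + 1))).getD 0)) := by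
  unfold transpose_doc
  have hinner : ∀ i : Int,
      ((PySem.List.pyRange 0 (PySem.List.len docs) 1).foldl (fun ligne j =>
        if PySem.Dict.contains (PySem.Dict.mk (PySem.List.pyGetD docs j [])) (PySem.Int.toStr (i + 1)) then
          ligne ++ [PySem.Dict.getD (PySem.Dict.mk (PySem.List.pyGetD docs j [])) (PySem.Int.toStr (i + 1)) 0]
        else
          ligne ++ [0]) [])
      = docs.map (fun doc => (PySem.Dict.get? (PySem.Dict.mk doc) (PySem.Int.toStr (i + 1))).getD 0) := by
    intro i
    rw [PySem.List.foldl_pyRange_zero_pyGetD docs [] (fun ligne rawdoc =>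
      if PySem.Dict.contains (PySem.Dict.mk rawdoc) (PySem.Int.toStr (i + 1)) then
        ligne ++ [PySem.Dict.getD (PySem.Dict.mk rawdoc) (PySem.Int.toStr (i + 1)) 0]
      else
        ligne ++ [0]) []]
    have hfun : (fun (ligne : List Int) (rawdoc : List (String × Int)) =>
        if PySem.Dict.contains (PySem.Dict.mk rawdoc) (PySem.Int.toStr (i + 1)) then
          ligne ++ [PySem.Dict.getD (PySem.Dict.mk rawdoc) (PySem.Int.toStr (i + 1)) 0]
        else
          ligne ++ [0])
        = (fun ligne rawdoc => ligne ++
            [(PySem.Dict.get? (PySem.Dict.mk rawdoc) (PySem.Int.toStr (i + 1))).getD 0]) := by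
      funext l d
      rw [PySem.Dict.contains_eq_isSome_get?, PySem.Dict.getD_eq_get?_getD]
      cases PySem.Dict.get? (PySem.Dict.mk d) (PySem.Int.toStr (i + 1)) <;> simp
    rw [hfun, PySem.List.foldl_append_eq_flatMap]
    rw [List.nil_append, ← List.map_eq_flatMap]
  have houter : (fun (docs_mat : List (List Int)) (i : Int) => docs_mat ++
      [((PySem.List.pyRange 0 (PySem.List.len docs) 1).foldl (fun ligne j =>
        if PySem.Dict.contains (PySem.Dict.mk (PySem.List.pyGetD docs j [])) (PySem.Int.toStr (i + 1)) then
          ligne ++ [PySem.Dict.getD (PySem.Dict.mk (PySem.List.pyGetD docs j [])) (PySem.Int.toStr (i + 1)) 0]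
        else
          ligne ++ [0]) [])])
      = (fun docs_mat i => docs_mat ++
          [docs.map (fun doc => (PySem.Dict.get? (PySem.Dict.mk doc) (PySem.Int.toStr (i + 1))).getD 0)]) := by
    funext m i
    rw [hinner i]
  rw [houter, PySem.List.foldl_append_eq_flatMap]
  rw [List.nil_append, ← List.map_eq_flatMap]

-- ===== VERDICT (by name: the statement is the Claim_ definition above) =====
theorem transpose_doc_spec : Claim_equal_transpose_doc := by
  intro docs nb _ hpre
  unfold Spec_transpose_doc
  have halt : transpose_doc_alt docs nb
      = (PySem.List.enumerate docs ((0 : Nat) : Int)).foldl (fun mat p => pvApply nb p.1 p.2 mat)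
        ((PySem.List.pyRange 0 nb 1).map (fun _ => List.replicate docs.length (0 : Int))) := rfl
  set Z := (PySem.List.pyRange 0 nb 1).map (fun _ => List.replicate docs.length (0 : Int)) with hZ
  have hZlen : Z.length = nb.toNat := by simp [hZ, PySem.List.length_pyRange_one]
  have hZrow : ∀ row ∈ Z, row.length = docs.length := by
    intro row hr
    simp only [hZ, List.mem_map] at hr
    obtain ⟨_, _, rfl⟩ := hr
    simp
  have hZcell : ∀ r j, pvCell Z r j = 0 := by
    intro r j
    unfold pvCell
    rw [show Z.getD r [] = (Z[r]?).getD [] from List.getD_eq_getElem?_getD ..]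
    rcases h : Z[r]? with _ | row
    · simp [List.getD_eq_getElem?_getD]
    · have hrow : row ∈ Z := List.mem_of_getElem? h
      simp only [hZ, List.mem_map] at hrow
      obtain ⟨_, _, rfl⟩ := hrow
      simp [List.getD_eq_getElem?_getD, List.getElem?_replicate]
      split <;> rfl
  obtain ⟨b1, b2, b3⟩ := pvScatter_spec nb docs.length docs 0 Z hZlen hZrow (by omega)
  simp only [Nat.cast_zero] at halt b1 b2 b3
  rw [pvA_eq, halt]
  apply List.ext_getElem
  · simp [PySem.List.length_pyRange_one, b1]
  · intro r h1 h2
    rw [List.getElem_map, PySem.List.getElem_pyRange_one]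
    have hrn : r < nb.toNat := by simpa [PySem.List.length_pyRange_one] using h1
    apply List.ext_getElem
    · rw [List.length_map]
      have := b2 _ (List.getElem_mem h2)
      omega
    · intro j hj1 hj2
      rw [List.getElem_map]
      have hjL : j < docs.length := by simpa using hj1
      have hcell := pvCell_eq_getElem _ r j (by omega) hj2
      rw [← hcell, b3 r j, if_pos (by omega), hZcell]
      have hdocj : docs.getD (j - 0) [] = docs[j] := by
        simpa using List.getD_eq_getElem?_getD .. |>.trans (by rw [List.getElem?_eq_getElem hjL]; rfl)
      rw [hdocj, pvLM_eq_get? nb docs[j] (r : Int) (by omega) (by omega)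
        (hpre _ (List.getElem_mem hjL))]
      norm_num
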